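-- pv_equiv track=rewrite | github.com/grjoke/McKean-Vlasov-simulations-in-1d | modules/aux_functions.py | findLocalMaxMin
-- ===== SOURCE A (Python) =====
-- def findLocalMaxMin(arr):
--     """
--     Find the first local maximum and the first local minimum in a 1D array.
--
--     Parameters
--     ----------
--     arr : ndarray
--         1D array to analyze.
--
--     Returns
--     -------
--     tuple of int
--         Indices of the first local maximum and the first local minimum.
--     """
--     n = len(arr)
--     mx = []
--     mn = []
--
--     # Iterating over all points to check
--     # local maxima and local minima
--     for i in range(2, n-2):
--         # Condition for local minima
--         if(arr[i-1] > arr[i] < arr[i + 1]):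
--             mn.append(i)
--         # Condition for local maxima
--         elif(arr[i-1] < arr[i] > arr[i + 1]):
--             mx.append(i)
--     return mx[0], mn[0]
-- ===== SOURCE B (Python) =====
-- def findLocalMaxMin(arr):
--     n = len(arr)
--     mx = next(i for i in range(2, n - 2) if arr[i - 1] < arr[i] > arr[i + 1])
--     mn = next(i for i in range(2, n - 2) if arr[i - 1] > arr[i] < arr[i + 1])
--     return mx, mn
-- ===== Notes on version B (the rewrite author's own statement) =====
-- stated objective: idiomatic
-- what changed: B replaces the single scan that accumulates full lists of all maxima/minima with two find-first generator passes that stop at the first match, so no lists are built and the scan ends early.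
import Mathlib
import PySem

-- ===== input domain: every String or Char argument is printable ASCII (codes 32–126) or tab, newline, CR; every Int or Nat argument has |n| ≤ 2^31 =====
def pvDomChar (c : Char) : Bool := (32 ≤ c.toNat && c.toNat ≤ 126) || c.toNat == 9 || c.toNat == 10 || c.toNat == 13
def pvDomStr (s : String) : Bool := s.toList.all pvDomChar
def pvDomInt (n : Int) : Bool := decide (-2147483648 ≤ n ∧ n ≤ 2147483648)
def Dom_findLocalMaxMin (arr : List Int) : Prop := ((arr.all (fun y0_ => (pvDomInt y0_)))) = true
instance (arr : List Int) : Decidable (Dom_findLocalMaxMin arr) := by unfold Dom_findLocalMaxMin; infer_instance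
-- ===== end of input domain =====

-- B replaces A's single scan accumulating lists of all maxima/minima with two independent
-- find-first passes; equal returns proved on inputs where both a local max and min exist (Pre_).


-- ===== PORT A =====
-- indices i-1, i, i+1 are always in range for i ∈ [2, n-3], so pyGet? … .getD 0 is exact;
-- mx[0] / mn[0] raise IndexError when empty — those inputs are outside Pre_.
def findLocalMaxMin (arr : List Int) : Int × Int :=
  let n : Int := arr.length
  let p : List Int × List Int :=
    (PySem.List.pyRange 2 (n - 2) 1).foldl
      (fun (st : List Int × List Int) i =>
        let a := (PySem.List.pyGet? arr (i - 1)).getD 0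
        let b := (PySem.List.pyGet? arr i).getD 0
        let c := (PySem.List.pyGet? arr (i + 1)).getD 0
        if a > b ∧ b < c then (st.1, st.2 ++ [i])
        else if a < b ∧ b > c then (st.1 ++ [i], st.2)
        else st)
      ([], [])
  ((p.1.head?).getD 0, (p.2.head?).getD 0)

-- ===== PORT B =====
def pvIsMax (arr : List Int) (i : Int) : Bool :=
  decide ((PySem.List.pyGet? arr (i - 1)).getD 0 < (PySem.List.pyGet? arr i).getD 0)
    && decide ((PySem.List.pyGet? arr i).getD 0 > (PySem.List.pyGet? arr (i + 1)).getD 0)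

def pvIsMin (arr : List Int) (i : Int) : Bool :=
  decide ((PySem.List.pyGet? arr (i - 1)).getD 0 > (PySem.List.pyGet? arr i).getD 0)
    && decide ((PySem.List.pyGet? arr i).getD 0 < (PySem.List.pyGet? arr (i + 1)).getD 0)

-- next(...) raises StopIteration when no match — those inputs are outside Pre_.
def findLocalMaxMin_alt (arr : List Int) : Int × Int :=
  let n : Int := arr.length
  let r := PySem.List.pyRange 2 (n - 2) 1
  (((r.find? (pvIsMax arr)).getD 0), ((r.find? (pvIsMin arr)).getD 0))

-- ===== PRECONDITION & SPEC =====
-- Pre_ excludes exactly the inputs where A raises IndexError (no local max, or no local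
-- min, in the scanned window): it requires one index of each kind in range(2, n-2).
def Pre_findLocalMaxMin (arr : List Int) : Prop :=
  (∃ i ∈ PySem.List.pyRange 2 ((arr.length : Int) - 2) 1, pvIsMax arr i = true) ∧
  (∃ i ∈ PySem.List.pyRange 2 ((arr.length : Int) - 2) 1, pvIsMin arr i = true)
instance (arr : List Int) : Decidable (Pre_findLocalMaxMin arr) := by unfold Pre_findLocalMaxMin; infer_instance
def pvWitness_findLocalMaxMin : List Int := [0, 0, 5, 0, 5, 0, 0]

def Spec_findLocalMaxMin (arr : List Int) (out : Int × Int) : Prop := out = findLocalMaxMin_alt arr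
instance (arr : List Int) (out : Int × Int) : Decidable (Spec_findLocalMaxMin arr out) := by unfold Spec_findLocalMaxMin; infer_instance

-- ===== CLAIM (what is proved, stated in full; the proofs are below) =====
def Claim_equal_findLocalMaxMin : Prop := ∀ (arr : List Int), Dom_findLocalMaxMin arr → Pre_findLocalMaxMin arr → Spec_findLocalMaxMin arr (findLocalMaxMin arr)

-- ===== LEMMAS AND PROOFS =====

-- A's fold appends matching indices: the accumulated pair is (mx0 ++ filter max, mn0 ++ filter min).
lemma pv_fold_filter (arr : List Int) (l : List Int) (mx0 mn0 : List Int) :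
    l.foldl
      (fun (st : List Int × List Int) i =>
        let a := (PySem.List.pyGet? arr (i - 1)).getD 0
        let b := (PySem.List.pyGet? arr i).getD 0
        let c := (PySem.List.pyGet? arr (i + 1)).getD 0
        if a > b ∧ b < c then (st.1, st.2 ++ [i])
        else if a < b ∧ b > c then (st.1 ++ [i], st.2)
        else st)
      (mx0, mn0)
    = (mx0 ++ l.filter (pvIsMax arr), mn0 ++ l.filter (pvIsMin arr)) := by
  induction l generalizing mx0 mn0 with
  | nil => simp
  | cons x xs ih =>
    simp only [List.foldl_cons, List.filter_cons]
    by_cases hmin : (PySem.List.pyGet? arr (x - 1)).getD 0 > (PySem.List.pyGet? arr x).getD 0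
        ∧ (PySem.List.pyGet? arr x).getD 0 < (PySem.List.pyGet? arr (x + 1)).getD 0
    · have hMin : pvIsMin arr x = true := by
        simp [pvIsMin, hmin.1, hmin.2]
      have hMax : pvIsMax arr x = false := by
        simp only [pvIsMax] at *
        simp only [Bool.and_eq_false_iff, decide_eq_false_iff_not]
        left; omega
      simp [hmin, ih, hMin, hMax]
    · by_cases hmax : (PySem.List.pyGet? arr (x - 1)).getD 0 < (PySem.List.pyGet? arr x).getD 0
          ∧ (PySem.List.pyGet? arr x).getD 0 > (PySem.List.pyGet? arr (x + 1)).getD 0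
      · have hMax : pvIsMax arr x = true := by simp [pvIsMax, hmax.1, hmax.2]
        have hMin : pvIsMin arr x = false := by
          simp only [pvIsMin, Bool.and_eq_false_iff, decide_eq_false_iff_not]
          left; omega
        simp [hmin, hmax, ih, hMin, hMax]
      · have hMax : pvIsMax arr x = false := by
          simp only [pvIsMax, Bool.and_eq_false_iff, decide_eq_false_iff_not]
          omega
        have hMin : pvIsMin arr x = false := by
          simp only [pvIsMin, Bool.and_eq_false_iff, decide_eq_false_iff_not]
          omega
        simp [hmin, hmax, ih, hMin, hMax]

-- find? is the head of the filtered list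
lemma pv_find?_eq_head?_filter {α : Type} (p : α → Bool) (l : List α) :
    l.find? p = (l.filter p).head? := by
  induction l with
  | nil => rfl
  | cons x xs ih =>
    cases h : p x with
    | true => rw [List.find?_cons_of_pos h, List.filter_cons_of_pos h, List.head?_cons]
    | false =>
      rw [List.find?_cons_of_neg (by simp [h]), List.filter_cons_of_neg (by simp [h]), ih]

-- ===== VERDICT (by name: the statement is the Claim_ definition above) =====
theorem findLocalMaxMin_spec : Claim_equal_findLocalMaxMin := by
  intro arr _ _
  unfold Spec_findLocalMaxMin findLocalMaxMin findLocalMaxMin_alt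
  simp only [pv_fold_filter, pv_find?_eq_head?_filter, List.nil_append]
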